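-- pv_equiv track=rewrite | github.com/Arsen1302/Code-copy-detector | TestData/solutions/problem_1566_3.py | solution_1566_3
-- ===== SOURCE A (Python) =====
-- from typing import List
--
-- def solution_1566_3(nums: List[int]) -> int:
--     c=0
--     s=sum(nums)
--     k=0
--     for i in range(len(nums)-1):
--         s=s-nums[i]
--         c+=nums[i]
--         if s<=c:
--             k+=1
--     return k
-- ===== SOURCE B (Python) =====
-- from typing import List
--
-- def solution_1566_3(nums: List[int]) -> int:
--     # Divide and conquer: rec(xs, base) returns (sum(xs), number of j in
--     # 1..len(xs) with 2*(base + sum(xs[:j])) >= total).  A split after global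
--     # index i is good iff suffix <= prefix iff 2*prefix >= total, and the
--     # candidate prefixes are exactly the nonempty prefixes of nums[:-1].
--     total = sum(nums)
--     def rec(xs, base):
--         if not xs:
--             return (0, 0)
--         if len(xs) == 1:
--             p = base + xs[0]
--             return (xs[0], 1 if 2 * p >= total else 0)
--         mid = len(xs) // 2
--         sl, kl = rec(xs[:mid], base)
--         sr, kr = rec(xs[mid:], base + sl)
--         return (sl + sr, kl + kr)
--     return rec(nums[:-1], 0)[1]
-- ===== Notes on version B (the rewrite author's own statement) =====
-- stated objective: alternative
-- what changed: A threads two running scalars (shrinking suffix sum, growing prefix sum) through one left-to-right index loop; B is a divide-and-conquer recursion that splits the candidate list in halves, each call returning (segment sum, count of good split points inside it given the prefix sum before it), using the identity suffix <= prefix iff 2*prefix >= total.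
import Mathlib
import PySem

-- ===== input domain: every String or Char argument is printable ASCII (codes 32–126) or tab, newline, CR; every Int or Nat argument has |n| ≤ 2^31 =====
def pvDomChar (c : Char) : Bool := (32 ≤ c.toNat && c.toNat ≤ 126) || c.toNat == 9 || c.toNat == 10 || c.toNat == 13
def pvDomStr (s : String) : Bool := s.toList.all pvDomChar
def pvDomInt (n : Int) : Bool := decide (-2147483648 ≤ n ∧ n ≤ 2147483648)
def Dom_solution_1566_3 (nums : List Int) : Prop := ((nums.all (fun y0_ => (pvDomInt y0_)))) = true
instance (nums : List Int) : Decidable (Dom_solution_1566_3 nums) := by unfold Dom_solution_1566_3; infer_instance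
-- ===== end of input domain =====

-- B replaces A's single forward loop (two running scalars) by a divide-and-conquer
-- recursion over halves of nums[:-1]; same results, a genuinely different traversal.

-- ===== PORT A =====
def solution_1566_3 (nums : List Int) : Int :=
  let st := (PySem.List.pyRange 0 ((nums.length : Int) - 1) 1).foldl
    (fun (st : Int × Int × Int) i =>
      let s := st.1 - PySem.List.pyGetD nums i 0
      let c := st.2.1 + PySem.List.pyGetD nums i 0
      let k := if s ≤ c then st.2.2 + 1 else st.2.2
      (s, c, k))
    (nums.sum, 0, 0)
  st.2.2

-- ===== PORT B =====
-- rec(xs, base) of Source B; Python's xs[:mid] / xs[mid:] with 0 ≤ mid ≤ len(xs)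
-- are exactly List.take mid / List.drop mid, and len(xs)//2 (len ≥ 0) is Nat division.
def bRec (total : Int) : List Int → Int → Int × Int
  | [], _ => (0, 0)
  | [x], base => (x, if 2 * (base + x) ≥ total then 1 else 0)
  | x :: y :: rest, base =>
    let mid := (x :: y :: rest).length / 2
    let l := bRec total ((x :: y :: rest).take mid) base
    let r := bRec total ((x :: y :: rest).drop mid) (base + l.1)
    (l.1 + r.1, l.2 + r.2)
  termination_by xs => xs.length
  decreasing_by
  · simp [List.length_take]; omega
  · simp [List.length_drop]; omega

def solution_1566_3_alt (nums : List Int) : Int :=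
  let total := nums.sum
  (bRec total (PySem.List.slice nums none (some (-1))) 0).2

-- ===== PRECONDITION & SPEC =====
def Spec_solution_1566_3 (nums : List Int) (out : Int) : Prop := out = solution_1566_3_alt nums
instance (nums : List Int) (out : Int) : Decidable (Spec_solution_1566_3 nums out) := by unfold Spec_solution_1566_3; infer_instance

-- ===== CLAIM =====
def Claim_equal_solution_1566_3 : Prop := ∀ (nums : List Int), Dom_solution_1566_3 nums → Spec_solution_1566_3 nums (solution_1566_3 nums)

-- ===== LEMMAS AND PROOFS =====

-- running prefix sums of xs starting from accumulator a
def scanSums : List Int → Int → List Int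
  | [], _ => []
  | x :: xs, a => (a + x) :: scanSums xs (a + x)

-- count of entries p with total ≤ 2*p
def cntFold (total : Int) (l : List Int) : Int :=
  l.foldl (fun k p => if total ≤ 2 * p then k + 1 else k) 0

theorem scanSums_append (xs ys : List Int) (a : Int) :
    scanSums (xs ++ ys) a = scanSums xs a ++ scanSums ys (a + xs.sum) := by
  induction xs generalizing a with
  | nil => simp [scanSums]
  | cons x xs ih => simp [scanSums, ih, add_assoc]

theorem cnt_shift (total : Int) (l : List Int) (k : Int) :
    l.foldl (fun k p => if total ≤ 2 * p then k + 1 else k) k = k + cntFold total l := by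
  induction l generalizing k with
  | nil => simp [cntFold]
  | cons p l ih =>
    simp only [cntFold, List.foldl]
    rw [ih, ih (if total ≤ 2 * p then (0:Int) + 1 else 0)]
    split_ifs <;> ring

theorem cnt_append (total : Int) (l r : List Int) :
    cntFold total (l ++ r) = cntFold total l + cntFold total r := by
  simp only [cntFold, List.foldl_append]
  rw [cnt_shift]
  rfl

theorem bRec_eq (total : Int) (xs : List Int) (base : Int) :
    bRec total xs base = (xs.sum, cntFold total (scanSums xs base)) := by
  fun_induction bRec total xs base with
  | case1 => simp [scanSums, cntFold]
  | case2 x base =>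
    simp [scanSums, cntFold, ge_iff_le]
  | case3 x y rest base mid l r ih1 ih2 ih3 =>
    have hsplit : (x :: y :: rest) = (x :: y :: rest).take mid ++ (x :: y :: rest).drop mid :=
      (List.take_append_drop mid _).symm
    have hl : l = ((((x :: y :: rest).take mid)).sum,
        cntFold total (scanSums ((x :: y :: rest).take mid) base)) := ih1
    have hr : r = ((((x :: y :: rest).drop mid)).sum,
        cntFold total (scanSums ((x :: y :: rest).drop mid) (base + l.1))) := ih3
    rw [hl] at hr
    rw [hl, hr]
    simp only [Prod.mk.injEq]
    constructor
    · conv_rhs => rw [hsplit]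
      simp
    · conv_rhs => rw [hsplit]
      rw [scanSums_append, cnt_append]

-- A's fold equals the count over the prefix-sum scan of the first n-1 elements
theorem range_foldl_getD {σ : Type} (xs : List Int) (m : Nat) (h : m ≤ xs.length)
    (f : σ → Int → σ) (init : σ) :
    (List.range m).foldl (fun st j => f st (xs.getD j 0)) init
      = (xs.take m).foldl f init := by
  induction m generalizing init with
  | zero => simp
  | succ m ih =>
    have hm : m < xs.length := by omega
    rw [List.range_succ, List.foldl_append, ih (by omega)]
    have : xs.take (m + 1) = xs.take m ++ [xs[m]] := by
      rw [List.take_add_one]; simp [List.getElem?_eq_getElem hm]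
    rw [this, List.foldl_append]
    simp [List.getD, List.getElem?_eq_getElem hm]

theorem key (xs : List Int) (s c k : Int) :
    (xs.foldl (fun (st : Int × Int × Int) x =>
        (st.1 - x, st.2.1 + x, if st.1 - x ≤ st.2.1 + x then st.2.2 + 1 else st.2.2))
      (s, c, k)).2.2
      = (scanSums xs c).foldl (fun k p => if s + c ≤ 2 * p then k + 1 else k) k := by
  induction xs generalizing s c k with
  | nil => rfl
  | cons x xs ih =>
    simp only [List.foldl, scanSums]
    rw [ih]
    have h1 : (s - x ≤ c + x) ↔ (s + c ≤ 2 * (c + x)) := by omega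
    have h2 : s - x + (c + x) = s + c := by ring
    simp only [h2, h1]

theorem slice_neg_one (xs : List Int) :
    PySem.List.slice xs none (some (-1)) = xs.take (xs.length - 1) := by
  have := PySem.List.slice_to_neg_natCast xs 1 (by omega)
  simpa using this

theorem solution_eq (nums : List Int) : solution_1566_3 nums = solution_1566_3_alt nums := by
  unfold solution_1566_3 solution_1566_3_alt
  simp only [slice_neg_one, bRec_eq]
  cases nums with
  | nil => rfl
  | cons y ys =>
    have hlen : ((y :: ys).length : Int) - 1 = ((ys.length : Nat) : Int) := by
      simp only [List.length_cons]; push_cast; ring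
    rw [hlen, PySem.List.pyRange_zero_natCast]
    rw [List.foldl_map]
    simp only [PySem.List.pyGetD_natCast]
    rw [range_foldl_getD (y :: ys) ys.length (by simp) (fun (st : Int × Int × Int) x =>
        (st.1 - x, st.2.1 + x, if st.1 - x ≤ st.2.1 + x then st.2.2 + 1 else st.2.2))
        ((y :: ys).sum, 0, 0)]
    rw [key]
    have hlen2 : (y :: ys).length - 1 = ys.length := by simp
    rw [hlen2, cnt_shift]
    simp only [cntFold, zero_add, add_zero, List.sum_cons]
    rfl

-- ===== VERDICT =====
theorem solution_1566_3_spec : Claim_equal_solution_1566_3 := by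
  intro nums _
  unfold Spec_solution_1566_3
  exact solution_eq nums
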